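/- GENERATED by farm/mkstatement.py from design/units.tsv (unit `GifFreeExtensions.COMPOSITION`) and the Specs of Gif/Spec/*.lean — do not edit.
   THE STATEMENT of the proof unit `GifFreeExtensions.COMPOSITION`: the function `GifFreeExtensions` (42 instructions) satisfies its contract,
   GIVEN THE STATEMENTS OF ITS 2 SEGMENTS (`Gif.Spec.GifFreeExtensions.Seg<k> Lay μ u₀`: what the unit `GifFreeExtensions.<k>` proves).
   No machine code is walked: `ReachVia.trans` along the segments (the exit assertion of a segment is the entry assertion of
   its successor), an induction on the loop measures. What the names mean: ProgX/Base/Spec/Basic.lean. The theorem to prove: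
   `theorem GifFreeExtensions_COMPOSITION_ok : Gif.Spec.GifFreeExtensions_COMPOSITION.Statement`. -/
import Gif.Code
import Gif.Dec.All
import Gif.Labels
import Gif.Spec.Alloc
import Gif.Spec.Seg_GifFreeExtensions
namespace Gif.Spec.GifFreeExtensions_COMPOSITION
open X86 X86.User Asan

/-- The statement of unit `GifFreeExtensions.COMPOSITION`. -/
def Statement : Prop :=
  ∀ (Lay : Layout) (_hLay : Lay.hi = 0x1000000) (μ : Microarch) (_hμ : UserX.MicroOK μ) (u₀ : State)
    (_h_GifFreeExtensions_1 : Gif.Spec.GifFreeExtensions.Seg1 Lay μ u₀)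
    (_h_GifFreeExtensions_2 : Gif.Spec.GifFreeExtensions.Seg2 Lay μ u₀),
    ∀ (H : Heap) (rest : List Obj) (frames : List (Nat × FrameLayout)) (e : Option Exts) (ob on : Nat), Calls Lay μ ProgX.Base.WayInv (ProgX.Base.conv u₀) Gif.L.GifFreeExtensions.entry (Gif.Spec.GifFreeExtensions.spec H rest frames e ob on)

end Gif.Spec.GifFreeExtensions_COMPOSITION
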